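-- pv_equiv track=rewrite | github.com/Nicolas-Matias/sg17collab | auto-doc-latex/scripts-new/generate_question_report.py | _parse_liaison_destinations
-- ===== SOURCE A (Python) =====
-- def _parse_liaison_destinations(title):
--     """Parse '[to X]' and '[for info to Y]' from a liaison statement title.
--
--     Returns (action_to, info_to) strings.
--     """
--     action_to = ""
--     info_to = ""
--     # Find all bracketed sections
--     idx = 0
--     while idx < len(title):
--         start = title.find('[', idx)
--         if start < 0:
--             break
--         end = title.find(']', start)
--         if end < 0:
--             break
--         bracket = title[start + 1:end].strip()
--         if bracket.lower().startswith('for info'):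
--             # "[for info to X, Y]" → extract after "for info to "
--             prefix = 'for info to '
--             pos = bracket.lower().find(prefix)
--             if pos >= 0:
--                 info_to = bracket[pos + len(prefix):]
--         elif bracket.lower().startswith('to '):
--             action_to = bracket[3:]  # skip "to "
--         idx = end + 1
--     return action_to, info_to
-- ===== SOURCE B (Python) =====
-- def _parse_liaison_destinations(title):
--     """Parse '[to X]' and '[for info to Y]' from a liaison statement title.
--
--     Single left-to-right character scan: collect chars between '[' and the
--     next ']' in a buffer, classify each completed bracket.
--     """
--     action_to = ""
--     info_to = ""
--     buf = None  # None = outside a bracket; else chars seen since '['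
--     for ch in title:
--         if buf is None:
--             if ch == '[':
--                 buf = []
--         elif ch == ']':
--             bracket = ''.join(buf).strip()
--             low = bracket.lower()
--             if low.startswith('for info'):
--                 pos = low.find('for info to ')
--                 if pos >= 0:
--                     info_to = bracket[pos + 12:]
--             elif low.startswith('to '):
--                 action_to = bracket[3:]
--             buf = None
--         else:
--             buf.append(ch)
--     return action_to, info_to
-- ===== Notes on version B (the rewrite author's own statement) =====
-- stated objective: alternative
-- what changed: Replaced A's repeated title.find('[')/find(']') index walk with a single left-to-right character scan that buffers the chars between '[' and the next ']' and classifies each completed bracket.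
import Mathlib
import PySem

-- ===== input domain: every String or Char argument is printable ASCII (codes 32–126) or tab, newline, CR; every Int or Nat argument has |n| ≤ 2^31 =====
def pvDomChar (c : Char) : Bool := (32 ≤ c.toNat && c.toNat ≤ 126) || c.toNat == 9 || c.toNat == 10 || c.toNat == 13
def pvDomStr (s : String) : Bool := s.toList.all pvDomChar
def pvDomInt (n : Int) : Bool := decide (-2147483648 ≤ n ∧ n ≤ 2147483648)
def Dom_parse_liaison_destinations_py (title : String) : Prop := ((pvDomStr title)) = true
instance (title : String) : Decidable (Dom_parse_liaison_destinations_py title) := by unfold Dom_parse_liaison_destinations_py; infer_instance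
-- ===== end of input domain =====

-- B replaces A's find-based index walk with a single left-to-right character scan
-- (a buffer collects the chars between '[' and the next ']'); objective: alternative.

-- ===== PORT A =====
-- literal port of A's while-loop: idx walks forward via find('[', idx) / find(']', start);
-- fuel = |title| + 1 bounds the iterations (idx strictly increases and stays ≤ |title|).
def parseA_loop (t : List Char) (fuel : Nat) (idx : Int)
    (action_to info_to : List Char) : List Char × List Char :=
  match fuel with
  | 0 => (action_to, info_to)
  | fuel + 1 =>
    if idx < (t.length : Int) then
      let start := PySem.Chars.findFrom t ['['] idx none
      if start < 0 then (action_to, info_to)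
      else
        let stop := PySem.Chars.findFrom t [']'] start none
        if stop < 0 then (action_to, info_to)
        else
          let bracket := PySem.Chars.strip (PySem.List.slice t (some (start + 1)) (some stop))
          let acc :=
            if PySem.Chars.startswith (PySem.Chars.lower bracket) ("for info".toList) then
              let pos := PySem.Chars.find (PySem.Chars.lower bracket) ("for info to ".toList)
              if 0 ≤ pos then
                (action_to, PySem.List.slice bracket (some (pos + 12)) none)  -- 12 = len('for info to ')
              else (action_to, info_to)
            else if PySem.Chars.startswith (PySem.Chars.lower bracket) ("to ".toList) then
              (PySem.List.slice bracket (some 3) none, info_to)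
            else (action_to, info_to)
          parseA_loop t fuel (stop + 1) acc.1 acc.2
    else (action_to, info_to)

def parse_liaison_destinations_py (title : String) : String × String :=
  let r := parseA_loop title.toList (title.toList.length + 1) 0 [] []
  (String.ofList r.1, String.ofList r.2)

-- ===== PORT B =====
-- literal port of B: fold over the characters; state = (action_to, info_to) plus
-- an optional buffer of chars seen since an unmatched '['.
def parseB_step (acc : (List Char × List Char) × Option (List Char)) (ch : Char) :
    (List Char × List Char) × Option (List Char) :=
  match acc with
  | ((action_to, info_to), none) =>
      if ch = '[' then ((action_to, info_to), some []) else ((action_to, info_to), none)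
  | ((action_to, info_to), some buf) =>
      if ch = ']' then
        let bracket := PySem.Chars.strip buf
        let acc' :=
          if PySem.Chars.startswith (PySem.Chars.lower bracket) ("for info".toList) then
            let pos := PySem.Chars.find (PySem.Chars.lower bracket) ("for info to ".toList)
            if 0 ≤ pos then
              (action_to, PySem.List.slice bracket (some (pos + 12)) none)  -- 12 = len('for info to ')
            else (action_to, info_to)
          else if PySem.Chars.startswith (PySem.Chars.lower bracket) ("to ".toList) then
            (PySem.List.slice bracket (some 3) none, info_to)
          else (action_to, info_to)
        (acc', none)
      else ((action_to, info_to), some (buf ++ [ch]))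

def parse_liaison_destinations_py_alt (title : String) : String × String :=
  let r := (title.toList.foldl parseB_step (([], []), none)).1
  (String.ofList r.1, String.ofList r.2)

-- ===== PRECONDITION & SPEC =====
def Spec_parse_liaison_destinations_py (title : String) (out : String × String) : Prop := out = parse_liaison_destinations_py_alt title
instance (title : String) (out : String × String) : Decidable (Spec_parse_liaison_destinations_py title out) := by unfold Spec_parse_liaison_destinations_py; infer_instance

-- ===== CLAIM (what is proved, stated in full; the proofs are below) =====
def Claim_equal_parse_liaison_destinations_py : Prop := ∀ (title : String), Dom_parse_liaison_destinations_py title → Spec_parse_liaison_destinations_py title (parse_liaison_destinations_py title)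

-- ===== LEMMAS AND PROOFS =====

-- the shared bracket-classification step, factored for the proof
def classify (action_to info_to braw : List Char) : List Char × List Char :=
  let bracket := PySem.Chars.strip braw
  if PySem.Chars.startswith (PySem.Chars.lower bracket) ("for info".toList) then
    let pos := PySem.Chars.find (PySem.Chars.lower bracket) ("for info to ".toList)
    if 0 ≤ pos then (action_to, PySem.List.slice bracket (some (pos + 12)) none)
    else (action_to, info_to)
  else if PySem.Chars.startswith (PySem.Chars.lower bracket) ("to ".toList) then
    (PySem.List.slice bracket (some 3) none, info_to)
  else (action_to, info_to)

lemma singleton_prefix_iff {c : Char} {t : List Char} :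
    [c] <+: t ↔ ∃ u, t = c :: u := by
  cases t with
  | nil => simp
  | cons x xs =>
    simp [List.cons_prefix_cons, eq_comm]

lemma find_singleton_of_not_mem {c : Char} {s : List Char} (h : c ∉ s) :
    PySem.Chars.find s [c] = -1 := by
  rw [PySem.Chars.find_eq_neg_one_iff]
  intro hinf
  exact h (hinf.subset (by simp))

lemma find_singleton_first {c : Char} {pre rest : List Char} (h : c ∉ pre) :
    PySem.Chars.find (pre ++ c :: rest) [c] = (pre.length : Int) := by
  have hnn : 0 ≤ PySem.Chars.find (pre ++ c :: rest) [c] := by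
    rw [PySem.Chars.find_nonneg_iff]
    exact ⟨pre, rest, by simp⟩
  obtain ⟨hpre, hmin⟩ := PySem.Chars.find_spec hnn
  set f := PySem.Chars.find (pre ++ c :: rest) [c] with hf
  -- no index < pre.length can host c
  have hno : ∀ i, i < pre.length → ¬ ([c] <+: (pre ++ c :: rest).drop i) := by
    intro i hi hpc
    rw [List.drop_append_of_le_length (by omega)] at hpc
    obtain ⟨u, hu⟩ := singleton_prefix_iff.mp hpc
    cases hdi : pre.drop i with
    | nil => have := congrArg List.length hdi; simp at this; omega
    | cons y ys =>
      rw [hdi] at hu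
      simp at hu
      exact h (hu.1 ▸ List.mem_of_mem_drop (hdi ▸ List.mem_cons_self))
  have h1 : ¬ f.toNat < pre.length := fun hlt => hno _ hlt hpre
  have h2 : ¬ pre.length < f.toNat := by
    intro hlt
    exact hmin pre.length hlt (by rw [List.drop_left]; exact ⟨rest, rfl⟩)
  omega

lemma foldB_outside_no_open {t : List Char} (h : '[' ∉ t) (a i : List Char) :
    t.foldl parseB_step ((a, i), none) = ((a, i), none) := by
  induction t with
  | nil => rfl
  | cons x xs ih =>
    simp at h
    simp [List.foldl_cons, parseB_step, Ne.symm h.1, ih h.2]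

lemma foldB_inside_no_close {t : List Char} (h : ']' ∉ t) (a i buf : List Char) :
    t.foldl parseB_step ((a, i), some buf) = ((a, i), some (buf ++ t)) := by
  induction t generalizing buf with
  | nil => simp
  | cons x xs ih =>
    simp at h
    simp [List.foldl_cons, parseB_step, Ne.symm h.1, ih h.2]

lemma step_close (a i buf : List Char) :
    parseB_step ((a, i), some buf) ']' = (classify a i buf, none) := by
  simp [parseB_step, classify]

lemma step_open (a i : List Char) :
    parseB_step ((a, i), none) '[' = ((a, i), some []) := by
  simp [parseB_step]

-- first occurrence decomposition
lemma first_occ {c : Char} {s : List Char} (h : c ∈ s) :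
    ∃ pre rest, s = pre ++ c :: rest ∧ c ∉ pre := by
  induction s with
  | nil => simp at h
  | cons x xs ih =>
    by_cases hx : x = c
    · exact ⟨[], xs, by simp [hx], by simp⟩
    · have hm : c ∈ xs := by simp at h; tauto
      obtain ⟨pre, rest, hs, hp⟩ := ih hm
      refine ⟨x :: pre, rest, by simp [hs], ?_⟩
      simp only [List.mem_cons, not_or]
      exact ⟨fun h' => hx h'.symm, hp⟩

lemma parseA_eq_foldB (fuel : Nat) :
    ∀ (t : List Char) (k : Nat) (a i : List Char),
      t.length - k < fuel → k ≤ t.length →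
      parseA_loop t fuel (k : Int) a i = ((t.drop k).foldl parseB_step ((a, i), none)).1 := by
  induction fuel with
  | zero => intro t k a i hf _; omega
  | succ fuel ih =>
    intro t k a i hf hk
    by_cases hlt : k < t.length
    case neg =>
      have : k = t.length := by omega
      subst this
      simp [parseA_loop, List.drop_length]
    case pos =>
      rw [parseA_loop]
      rw [if_pos (by exact_mod_cast hlt)]
      rw [PySem.Chars.findFrom_natCast t ['['] k hk]
      by_cases hopen : '[' ∈ t.drop k
      case neg =>
        rw [find_singleton_of_not_mem hopen]
        norm_num
        rw [foldB_outside_no_open hopen]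
      case pos =>
        obtain ⟨pre, rest, hdec, hpre⟩ := first_occ hopen
        rw [hdec, find_singleton_first hpre]
        have hkp : k + pre.length + 1 ≤ t.length := by
          have := congrArg List.length hdec
          simp [List.length_drop] at this
          omega
        rw [if_neg (show ¬((pre.length : Int) = -1) by omega)]
        rw [if_neg (show ¬((k : Int) + (pre.length : Int) < 0) by omega)]
        -- the ']' search starts at the '[' position
        have hstart : ((k : Int) + pre.length) = ((k + pre.length : Nat) : Int) := by push_cast; ring
        rw [hstart, PySem.Chars.findFrom_natCast t [']'] (k + pre.length) (by omega)]
        have hdropS : t.drop (k + pre.length) = '[' :: rest := by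
          have : t.drop (k + pre.length) = (t.drop k).drop pre.length := by
            rw [List.drop_drop]
          rw [this, hdec, List.drop_append_of_le_length (le_refl _), List.drop_length,
            List.nil_append]
        rw [hdropS]
        by_cases hclose : ']' ∈ rest
        case neg =>
          have hclose' : ']' ∉ '[' :: rest := by simp [hclose]
          rw [find_singleton_of_not_mem hclose']
          norm_num
          rw [foldB_outside_no_open hpre, step_open, foldB_inside_no_close hclose]
        case pos =>
          obtain ⟨mid, rest2, hrdec, hmid⟩ := first_occ hclose
          have hmid' : ']' ∉ '[' :: mid := by simp [hmid]
          have hrw : ('[' : Char) :: rest = ('[' :: mid) ++ ']' :: rest2 := by simp [hrdec]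
          rw [hrw, find_singleton_first hmid']
          rw [if_neg (show ¬(((('[' :: mid).length : Nat) : Int) = -1) by omega)]
          rw [if_neg (show ¬(((k + pre.length : Nat) : Int) + ((('[' :: mid).length : Nat) : Int) < 0) by omega)]
          -- bracket slice = mid
          have hlen : t.length = k + pre.length + 1 + mid.length + 1 + rest2.length := by
            have := congrArg List.length hdec
            simp [List.length_drop, hrdec] at this
            omega
          have hsl : PySem.List.slice t (some (((k + pre.length : Nat) : Int) + 1))
              (some (((k + pre.length : Nat) : Int) + ((('[' :: mid).length : Nat) : Int)))
              = mid := by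
            have h1 : (((k + pre.length : Nat) : Int) + 1) = ((k + pre.length + 1 : Nat) : Int) := by
              push_cast; ring
            have h2 : (((k + pre.length : Nat) : Int) + ((('[' :: mid).length : Nat) : Int))
                = ((k + pre.length + 1 + mid.length : Nat) : Int) := by
              simp only [List.length_cons]; push_cast; ring
            rw [h1, h2, PySem.List.slice_natCast]
            have hdrop1 : t.drop (k + pre.length + 1) = mid ++ ']' :: rest2 := by
              have : t.drop (k + pre.length + 1) = (t.drop (k + pre.length)).drop 1 := by
                rw [List.drop_drop]
              rw [this, hdropS, hrdec]; rfl
            rw [hdrop1]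
            have : k + pre.length + 1 + mid.length - (k + pre.length + 1) = mid.length := by omega
            rw [this, List.take_left]
          rw [hsl]
          -- recurse / continue the fold after the closing bracket
          have hstop1 : (((k + pre.length : Nat) : Int) + ((('[' :: mid).length : Nat) : Int) + 1)
              = ((k + pre.length + mid.length + 2 : Nat) : Int) := by
            simp only [List.length_cons]; push_cast; ring
          rw [hstop1]
          have hdroprest : t.drop (k + pre.length + mid.length + 2) = rest2 := by
            have : t.drop (k + pre.length + mid.length + 2)
                = (t.drop (k + pre.length + 1)).drop (mid.length + 1) := by
              rw [List.drop_drop]; ring_nf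
            have hdrop1 : t.drop (k + pre.length + 1) = mid ++ ']' :: rest2 := by
              have h' : t.drop (k + pre.length + 1) = (t.drop (k + pre.length)).drop 1 := by
                rw [List.drop_drop]
              rw [h', hdropS, hrdec]; rfl
            rw [this, hdrop1]
            rw [show mid.length + 1 = (mid ++ [']']).length by simp, show mid ++ ']' :: rest2 = (mid ++ [']']) ++ rest2 by simp, List.drop_left]
          rw [ih t (k + pre.length + mid.length + 2) _ _ (by omega) (by omega), hdroprest]
          rw [List.foldl_append, foldB_outside_no_open hpre, List.cons_append,
            List.foldl_cons, step_open, List.foldl_append, foldB_inside_no_close hmid,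
            List.nil_append, List.foldl_cons, step_close]
          rfl

lemma ports_agree (title : String) :
    parse_liaison_destinations_py title = parse_liaison_destinations_py_alt title := by
  unfold parse_liaison_destinations_py parse_liaison_destinations_py_alt
  rw [show (0 : Int) = ((0 : Nat) : Int) by norm_num,
    parseA_eq_foldB (title.toList.length + 1) title.toList 0 [] [] (by omega) (by omega)]
  rfl

-- ===== VERDICT (by name: the statement is the Claim_ definition above) =====
theorem parse_liaison_destinations_py_spec : Claim_equal_parse_liaison_destinations_py := by
  intro title _
  unfold Spec_parse_liaison_destinations_py
  exact ports_agree title
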